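-- pv_equiv track=rewrite | github.com/PedroJoseRodriguezGallego/Proyectos | Python/Telebot_IGCrawler/botPJRG.py | obtenerUsuario
-- ===== SOURCE A (Python) =====
-- def obtenerUsuario(link): #Funcion que extrae el nombre de usuario de cualquier enlace de perfil desde la app o busqueda en el navegador desde la pagina web
--     elementos = 0
--     nombreUsuario = ""
--     for caracter in link: #El nombre se encuentra entre la tercera / de la URL y la cuarta / o ?
--         if caracter == "/" or caracter == "?":
--             elementos = elementos + 1
--         if elementos == 3:
--             nombreUsuario = nombreUsuario + caracter #No existe el += se supone
--         if elementos == 4: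
--             break
--
--     return nombreUsuario[1:] #Elimina la primera posicion del string porque es la / que coge cuando entra en el if de elementos == 3
-- ===== SOURCE B (Python) =====
-- def obtenerUsuario(link):
--     parts = link.replace('?', '/').split('/')
--     return parts[3] if len(parts) > 3 else ""
-- ===== Notes on version B (the rewrite author's own statement) =====
-- stated objective: simpler
-- what changed: Replaces A's character-by-character scan with a delimiter counter, accumulator and break by normalizing '?' to '/', splitting the URL into segments once, and indexing the 4th segment.
import Mathlib
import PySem

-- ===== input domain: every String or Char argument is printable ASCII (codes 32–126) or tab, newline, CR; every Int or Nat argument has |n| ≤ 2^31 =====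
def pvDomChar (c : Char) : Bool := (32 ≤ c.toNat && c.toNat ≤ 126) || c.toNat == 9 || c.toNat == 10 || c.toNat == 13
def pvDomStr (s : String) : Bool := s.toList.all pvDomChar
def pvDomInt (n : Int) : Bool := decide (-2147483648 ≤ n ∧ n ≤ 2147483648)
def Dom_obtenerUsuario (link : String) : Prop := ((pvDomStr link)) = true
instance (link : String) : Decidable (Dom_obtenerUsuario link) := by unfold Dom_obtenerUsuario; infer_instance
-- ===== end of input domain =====

-- B replaces A's manual counting scan by split-at-delimiters and indexing the 4th segment (simpler decomposition, same O(n) cost).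

-- ===== PORT A =====
-- the for-loop of A: state (elementos, nombreUsuario); 'break' = returning the accumulator
def obtenerUsuarioLoop : Nat → List Char → List Char → List Char
  | _, acc, [] => acc
  | e, acc, c :: rest =>
    let e' := if c = '/' ∨ c = '?' then e + 1 else e
    let acc' := if e' = 3 then acc ++ [c] else acc
    if e' = 4 then acc' else obtenerUsuarioLoop e' acc' rest

def obtenerUsuario (link : String) : String :=
  -- return nombreUsuario[1:]
  String.ofList (PySem.List.slice (obtenerUsuarioLoop 0 [] link.toList) (some 1) none)

-- ===== PORT B =====
-- link.replace('?','/') for single characters is exactly a map; .split('/') with a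
-- one-character separator is exactly List.splitOn '/' (both keep empty segments,
-- '' splits to ['']): these are the corresponding Lean functions for B's library calls.
def obtenerUsuario_alt (link : String) : String :=
  let parts := (link.toList.map (fun c => if c = '?' then '/' else c)).splitOn '/'
  if 3 < parts.length then String.ofList (parts.getD 3 []) else ""

-- ===== PRECONDITION & SPEC =====
def Spec_obtenerUsuario (link : String) (out : String) : Prop := out = obtenerUsuario_alt link
instance (link : String) (out : String) : Decidable (Spec_obtenerUsuario link out) := by unfold Spec_obtenerUsuario; infer_instance

-- ===== CLAIM (what is proved, stated in full; the proofs are below) =====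
def Claim_equal_obtenerUsuario : Prop := ∀ (link : String), Dom_obtenerUsuario link → Spec_obtenerUsuario link (obtenerUsuario link)

-- ===== LEMMAS AND PROOFS =====

-- the delimiter predicate of A, as a Bool
def pvDelim (c : Char) : Bool := c = '/' ∨ c = '?'

-- mapping '?' to '/' turns the two-delimiter split into the single-delimiter split
lemma splitOnP_map_eq (cs : List Char) :
    List.splitOnP (· == '/') (cs.map (fun c => if c = '?' then '/' else c)) =
      List.splitOnP pvDelim cs := by
  induction cs with
  | nil => rfl
  | cons c rest ih =>
    simp only [List.map_cons, List.splitOnP_cons, ih]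
    by_cases h : c = '?'
    · simp [h, pvDelim]
    · by_cases h2 : c = '/' <;> simp [h, h2, pvDelim]

lemma headI_splitOnP (cs : List Char) :
    (List.splitOnP pvDelim cs).headI = cs.takeWhile (fun c => !pvDelim c) := by
  induction cs with
  | nil => rfl
  | cons c rest ih =>
    rw [List.splitOnP_cons]
    by_cases h : pvDelim c
    · simp [h, List.headI]
    · have hne := List.splitOnP_ne_nil pvDelim rest
      cases hsp : List.splitOnP pvDelim rest with
      | nil => exact absurd hsp hne
      | cons s ss =>
        simp only [hsp] at ih
        simp [h, List.modifyHead, List.headI, ← ih]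
lemma getD_zero_splitOnP (cs : List Char) :
    (List.splitOnP pvDelim cs).getD 0 [] = cs.takeWhile (fun c => !pvDelim c) := by
  have hne := List.splitOnP_ne_nil pvDelim cs
  have h := headI_splitOnP cs
  cases hsp : List.splitOnP pvDelim cs with
  | nil => exact absurd hsp hne
  | cons s ss => rw [hsp] at h; simpa using h
lemma loop_three (acc : List Char) (cs : List Char) :
    obtenerUsuarioLoop 3 acc cs = acc ++ cs.takeWhile (fun c => !pvDelim c) := by
  induction cs generalizing acc with
  | nil => simp [obtenerUsuarioLoop]
  | cons c rest ih =>
    by_cases h : pvDelim c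
    · have h' : c = '/' ∨ c = '?' := by
        simp [pvDelim] at h; rcases h with h | h <;> [left; right] <;> exact h
      simp [obtenerUsuarioLoop, h', h]
    · have h' : ¬ (c = '/' ∨ c = '?') := by
        simp [pvDelim] at h; simp [h]
      simp [obtenerUsuarioLoop, h', h, ih]
lemma modifyHead_getD_succ {α : Type} (f : α → α) (l : List α) (n : Nat) (d : α) :
    (l.modifyHead f).getD (n + 1) d = l.getD (n + 1) d := by
  cases l <;> rfl
lemma loop_main (cs : List Char) : ∀ (k : Nat), k ≤ 2 →
    (obtenerUsuarioLoop k [] cs).tail = (List.splitOnP pvDelim cs).getD (3 - k) [] := by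
  induction cs with
  | nil =>
    intro k hk
    interval_cases k <;> rfl
  | cons c rest ih =>
    intro k hk
    rw [List.splitOnP_cons]
    by_cases h : pvDelim c
    · have h' : c = '/' ∨ c = '?' := by
        simp [pvDelim] at h; rcases h with h | h <;> [left; right] <;> exact h
      by_cases hk2 : k = 2
      · subst hk2
        show (obtenerUsuarioLoop 2 [] (c :: rest)).tail = _
        have : obtenerUsuarioLoop 2 [] (c :: rest) = obtenerUsuarioLoop 3 [c] rest := by
          simp [obtenerUsuarioLoop, h']
        rw [this, loop_three]
        rw [if_pos h]
        show List.takeWhile (fun c => !pvDelim c) rest = ([] :: List.splitOnP pvDelim rest).getD (0 + 1) []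
        rw [List.getD_cons_succ]
        exact (getD_zero_splitOnP rest).symm
      · have hlt : k < 2 := by omega
        have step : obtenerUsuarioLoop k [] (c :: rest) = obtenerUsuarioLoop (k+1) [] rest := by
          have e3 : ¬ (k + 1 = 3) := by omega
          have e4 : ¬ (k + 1 = 4) := by omega
          simp [obtenerUsuarioLoop, h', e3, e4]
        rw [step, ih (k+1) (by omega), if_pos h]
        have : 3 - k = (3 - (k + 1)) + 1 := by omega
        rw [this, List.getD_cons_succ]
    · have h' : ¬ (c = '/' ∨ c = '?') := by
        simp [pvDelim] at h; simp [h]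
      have step : obtenerUsuarioLoop k [] (c :: rest) = obtenerUsuarioLoop k [] rest := by
        have e3 : ¬ (k = 3) := by omega
        have e4 : ¬ (k = 4) := by omega
        simp [obtenerUsuarioLoop, h', e3, e4]
      rw [step, ih k hk, if_neg h]
      have : 3 - k = (3 - k - 1) + 1 := by omega
      rw [this, modifyHead_getD_succ]

-- out-of-range getD is the default
lemma getD_of_le {α : Type} (l : List α) (d : α) (h : l.length ≤ 3) : l.getD 3 d = d := by
  unfold List.getD
  rw [List.getElem?_eq_none h]
  rfl

-- ===== VERDICT (by name: the statement is the Claim_ definition above) =====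
theorem obtenerUsuario_spec : Claim_equal_obtenerUsuario := by
  intro link _
  show _ = _
  unfold obtenerUsuario obtenerUsuario_alt
  rw [PySem.List.slice_from_one, List.splitOn, splitOnP_map_eq,
    loop_main link.toList 0 (by omega)]
  by_cases h : 3 < (List.splitOnP pvDelim link.toList).length
  · simp [h]
  · simp only [if_neg h]
    rw [getD_of_le _ _ (by omega)]
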